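-- pv_equiv track=rewrite | github.com/Moolfee/aois | LAB_1/menu.py | _format_excess3
-- ===== SOURCE A (Python) =====
-- def _format_excess3(dec_value, bits):
--     """Красивый вывод BCD"""
--     grouped = []
--     for index in range(0, len(bits), 4):
--         grouped.append("".join(str(bit) for bit in bits[index : index + 4]))
--     result = " ".join(grouped)
--     if dec_value < 0 and result:
--         return f"-{result}"
--     return result
-- ===== SOURCE B (Python) =====
-- def _format_excess3(dec_value, bits):
--     """Streaming one-pass formatting: append each bit, inserting a space before every 4th index."""
--     out = ""
--     for i, bit in enumerate(bits):
--         if i > 0 and i % 4 == 0: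
--             out += " "
--         out += str(bit)
--     if dec_value < 0 and out:
--         return "-" + out
--     return out
-- ===== Notes on version B (the rewrite author's own statement) =====
-- stated objective: alternative
-- what changed: Replaces the chunk-slice-then-join structure (range(0,len,4), per-nibble slices, two joins) with a single streaming pass over enumerate(bits) that appends each digit and inserts a space before every positive index divisible by 4.
import Mathlib
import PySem

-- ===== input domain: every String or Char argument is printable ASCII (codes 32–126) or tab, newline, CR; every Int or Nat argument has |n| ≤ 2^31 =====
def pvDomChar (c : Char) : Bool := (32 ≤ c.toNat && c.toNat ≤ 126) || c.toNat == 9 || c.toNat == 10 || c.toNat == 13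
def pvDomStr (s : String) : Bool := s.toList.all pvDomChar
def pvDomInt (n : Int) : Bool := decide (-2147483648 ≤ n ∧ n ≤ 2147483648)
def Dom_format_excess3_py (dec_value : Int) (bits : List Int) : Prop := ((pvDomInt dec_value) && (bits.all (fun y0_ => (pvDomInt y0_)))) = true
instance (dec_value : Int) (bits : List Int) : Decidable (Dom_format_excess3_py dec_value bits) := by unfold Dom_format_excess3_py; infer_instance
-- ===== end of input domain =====

-- B replaces A's slice-nibbles-then-join structure with one streaming pass over enumerate(bits)
-- that inserts a space before every positive index divisible by 4; same cost, different decomposition.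

-- ===== PORT A =====
-- grouped = []; for index in range(0, len(bits), 4): grouped.append("".join(str(bit) for bit in bits[index:index+4]))
-- result = " ".join(grouped); "-" prefix if dec_value < 0 and result non-empty.  (strings as List Char, wrapped at the end)
def format_excess3_py (dec_value : Int) (bits : List Int) : String :=
  let grouped : List (List Char) :=
    (PySem.List.pyRange 0 (bits.length : Int) 4).foldl
      (fun g index =>
        g ++ [PySem.Chars.join [] ((PySem.List.slice bits (some index) (some (index + 4))).map PySem.Int.toChars)])
      []
  let result : List Char := PySem.Chars.join [' '] grouped
  if dec_value < 0 ∧ result ≠ [] then String.ofList ('-' :: result) else String.ofList result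

-- ===== PORT B =====
-- out = ""; for i, bit in enumerate(bits): (space if i > 0 and i % 4 == 0) then str(bit); "-" prefix rule.
def format_excess3_py_alt (dec_value : Int) (bits : List Int) : String :=
  let out : List Char :=
    (PySem.List.enumerate bits).foldl
      (fun out ib =>
        (out ++ (if 0 < ib.1 ∧ PySem.Int.mod ib.1 4 = 0 then [' '] else [])) ++ PySem.Int.toChars ib.2)
      []
  if dec_value < 0 ∧ out ≠ [] then String.ofList ('-' :: out) else String.ofList out

-- ===== PRECONDITION & SPEC =====
def Spec_format_excess3_py (dec_value : Int) (bits : List Int) (out : String) : Prop := out = format_excess3_py_alt dec_value bits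
instance (dec_value : Int) (bits : List Int) (out : String) : Decidable (Spec_format_excess3_py dec_value bits out) := by unfold Spec_format_excess3_py; infer_instance

-- ===== CLAIM (what is proved, stated in full; the proofs are below) =====
def Claim_equal_format_excess3_py : Prop := ∀ (dec_value : Int) (bits : List Int), Dom_format_excess3_py dec_value bits → Spec_format_excess3_py dec_value bits (format_excess3_py dec_value bits)

-- ===== LEMMAS AND PROOFS =====

-- common normal form of the formatted digit string: nibble of ≤ 4 digits, then ' ' + rest if any
def fmt : List Int → List Char
  | [] => []
  | b :: bs =>
    (((b :: bs).take 4).map PySem.Int.toChars).flatten ++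
      (if (b :: bs).drop 4 = [] then [] else ' ' :: fmt ((b :: bs).drop 4))
  termination_by bits => bits.length
  decreasing_by simp

theorem join_empty_sep (l : List (List Char)) : PySem.Chars.join [] l = l.flatten := by
  induction l with
  | nil => simp [PySem.Chars.join_nil]
  | cons p rest ih =>
    cases rest with
    | nil => simp [PySem.Chars.join_singleton]
    | cons q rs => simp [PySem.Chars.join_cons_cons, ih]

theorem pyRange4_nil (m : Int) (h : m ≤ 0) : PySem.List.pyRange 0 m 4 = [] := by
  rw [PySem.List.pyRange_of_pos _ _ (by norm_num)]
  simp [show ¬ (0 < m) by omega]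

theorem pyRange4_cons (n : Int) (h : 0 < n) :
    PySem.List.pyRange 0 n 4 = 0 :: (PySem.List.pyRange 0 (n - 4) 4).map (· + 4) := by
  rw [PySem.List.pyRange_of_pos _ _ (by norm_num), PySem.List.pyRange_of_pos _ _ (by norm_num)]
  have hc : (if (0:Int) < n then ((n - 0 + 4 - 1) / 4).toNat else 0)
      = (if (0:Int) < n - 4 then ((n - 4 - 0 + 4 - 1) / 4).toNat else 0) + 1 := by
    split_ifs <;> omega
  rw [hc, List.range_succ_eq_map]
  simp [List.map_map, Function.comp]
  intro a _
  omega

-- the streaming loop, started at index s with empty accumulator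
def goB (s : Int) (bits : List Int) : List Char :=
  (PySem.List.enumerate bits s).foldl
    (fun out ib =>
      (out ++ (if 0 < ib.1 ∧ PySem.Int.mod ib.1 4 = 0 then [' '] else [])) ++ PySem.Int.toChars ib.2)
    []

theorem foldl_acc (bits : List Int) (s : Int) (acc : List Char) :
    (PySem.List.enumerate bits s).foldl
      (fun out ib =>
        (out ++ (if 0 < ib.1 ∧ PySem.Int.mod ib.1 4 = 0 then [' '] else [])) ++ PySem.Int.toChars ib.2)
      acc = acc ++ goB s bits := by
  induction bits generalizing s acc with
  | nil => simp [goB, PySem.List.enumerate]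
  | cons b bs ih =>
    rw [goB, PySem.List.enumerate_cons]
    simp only [List.foldl_cons]
    rw [ih, ih]
    simp

theorem goB_cons (s : Int) (b : Int) (bs : List Int) :
    goB s (b :: bs) =
      (if 0 < s ∧ PySem.Int.mod s 4 = 0 then [' '] else []) ++ PySem.Int.toChars b ++ goB (s + 1) bs := by
  rw [goB, PySem.List.enumerate_cons]
  simp only [List.foldl_cons]
  rw [foldl_acc]
  simp [goB]

theorem sep_zero (k : Nat) (r : Int) (hr : 0 < r) (hr4 : r < 4) :
    (if 0 < (4 * (k : Int) + r) ∧ PySem.Int.mod (4 * (k : Int) + r) 4 = 0 then ([' '] : List Char) else []) = [] := by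
  have hm : PySem.Int.mod (4 * (k : Int) + r) 4 = (4 * (k : Int) + r) % 4 :=
    PySem.Int.mod_eq_emod_of_pos (by norm_num)
  rw [hm]
  split_ifs with h
  · exact absurd h.2 (by omega)
  · rfl

theorem goB_nil (s : Int) : goB s [] = [] := by
  simp [goB, PySem.List.enumerate_nil]

theorem sep_head (k : Nat) :
    (if 0 < (4 * (k : Int)) ∧ PySem.Int.mod (4 * (k : Int)) 4 = 0 then ([' '] : List Char) else [])
      = (if 0 < k then [' '] else []) := by
  have hm : PySem.Int.mod (4 * (k : Int)) 4 = (4 * (k : Int)) % 4 :=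
    PySem.Int.mod_eq_emod_of_pos (by norm_num)
  rw [hm]
  split_ifs with h h'
  · rfl
  · exact absurd h.1 (by omega)
  · exact absurd (by constructor <;> omega) h
  · rfl

theorem goB_fmt (n : Nat) : ∀ (bits : List Int), bits.length = n → ∀ (k : Nat),
    goB (4 * (k : Int)) bits = (if 0 < k ∧ bits ≠ [] then [' '] else []) ++ fmt bits := by
  induction n using Nat.strong_induction_on with
  | _ n ih =>
    intro bits hlen k
    rcases bits with _ | ⟨b0, _ | ⟨b1, _ | ⟨b2, _ | ⟨b3, rest⟩⟩⟩⟩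
    · simp [goB_nil, fmt]
    · rw [goB_cons, sep_head, goB_nil]
      simp [fmt]
    · rw [goB_cons, goB_cons, sep_head, sep_zero k 1 (by norm_num) (by norm_num), goB_nil]
      simp [fmt]
    · rw [goB_cons, goB_cons, sep_head, sep_zero k 1 (by norm_num) (by norm_num),
          show (4 * (k:Int) + 1 + 1) = 4 * (k:Int) + 2 by ring, goB_cons,
          sep_zero k 2 (by norm_num) (by norm_num), goB_nil]
      simp [fmt]
    · rw [goB_cons, goB_cons, sep_head, sep_zero k 1 (by norm_num) (by norm_num),
          show (4 * (k:Int) + 1 + 1) = 4 * (k:Int) + 2 by ring, goB_cons,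
          sep_zero k 2 (by norm_num) (by norm_num),
          show (4 * (k:Int) + 2 + 1) = 4 * (k:Int) + 3 by ring, goB_cons,
          sep_zero k 3 (by norm_num) (by norm_num),
          show (4 * (k:Int) + 3 + 1) = 4 * ((k + 1 : Nat) : Int) by push_cast; ring]
      rw [ih rest.length (by simp at hlen; omega) rest rfl (k + 1)]
      rcases rest with _ | ⟨r0, rs⟩
      · simp [fmt]
      · simp only [fmt]
        simp [List.append_assoc]
        conv_rhs => rw [fmt]
        simp [List.drop_eq_nil_iff, List.append_assoc]

theorem slice_shift (bits : List Int) (j : Int) (hj : 0 ≤ j) :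
    PySem.List.slice bits (some (j + 4)) (some (j + 4 + 4))
      = PySem.List.slice (bits.drop 4) (some j) (some (j + 4)) := by
  rw [PySem.List.slice_toNat _ (by omega) (by omega), PySem.List.slice_toNat _ (by omega) (by omega)]
  rw [List.drop_drop]
  rw [show ((j + 4 + 4).toNat - (j + 4).toNat) = 4 by omega,
      show ((j + 4).toNat - j.toNat) = 4 by omega,
      show ((j + 4).toNat) = 4 + j.toNat by omega]

theorem A_core_fmt (n : Nat) : ∀ (bits : List Int), bits.length = n →
    PySem.Chars.join [' ']
      ((PySem.List.pyRange 0 (bits.length : Int) 4).map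
        (fun index => PySem.Chars.join [] ((PySem.List.slice bits (some index) (some (index + 4))).map PySem.Int.toChars)))
      = fmt bits := by
  induction n using Nat.strong_induction_on with
  | _ n ih =>
    intro bits hlen
    rcases bits with _ | ⟨b, bs⟩
    · simp [pyRange4_nil, PySem.Chars.join_nil, fmt]
    · rw [pyRange4_cons _ (by simp)]
      simp only [List.map_cons, List.map_map]
      have hchunk0 : PySem.List.slice (b :: bs) (some 0) (some (0 + 4)) = (b :: bs).take 4 := by
        rw [PySem.List.slice_toNat _ (by norm_num) (by norm_num)]
        rfl
      have hshift : List.map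
            ((fun index => PySem.Chars.join []
                ((PySem.List.slice (b :: bs) (some index) (some (index + 4))).map PySem.Int.toChars))
              ∘ (· + 4))
            (PySem.List.pyRange 0 ((b :: bs).length - 4 : Int) 4)
          = List.map
            (fun index => PySem.Chars.join []
                ((PySem.List.slice ((b :: bs).drop 4) (some index) (some (index + 4))).map PySem.Int.toChars))
            (PySem.List.pyRange 0 ((((b :: bs).drop 4).length : Nat) : Int) 4) := by
        have hRange : PySem.List.pyRange 0 ((b :: bs).length - 4 : Int) 4
            = PySem.List.pyRange 0 ((((b :: bs).drop 4).length : Nat) : Int) 4 := by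
          simp only [List.length_cons, List.length_drop]
          by_cases h4 : 4 ≤ bs.length + 1
          · congr 1
            push_cast
            omega
          · rw [pyRange4_nil _ (by push_cast; omega), pyRange4_nil _ (by push_cast; omega)]
        rw [hRange]
        apply List.map_congr_left
        intro j hj
        have hj0 : 0 ≤ j := ((PySem.List.mem_pyRange_iff_of_pos (by norm_num) j).mp hj).1
        simp only [Function.comp]
        rw [slice_shift _ j hj0]
      rw [hshift, hchunk0]
      by_cases hD : (b :: bs).drop 4 = []
      · rw [show ((((b :: bs).drop 4).length : Nat) : Int) = 0 by rw [hD]; rfl]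
        rw [pyRange4_nil _ le_rfl]
        simp only [List.map_nil, PySem.Chars.join_singleton, join_empty_sep]
        conv_rhs => rw [fmt]
        rw [if_pos hD]
        simp
      · have hpos : 0 < ((((b :: bs).drop 4).length : Nat) : Int) := by
          rcases h : (b :: bs).drop 4 with _ | ⟨r0, rs⟩
          · exact absurd h hD
          · simp only [List.length_cons]
            push_cast
            omega
        have hih := ih ((b :: bs).drop 4).length (by simp at hlen ⊢; omega) ((b :: bs).drop 4) rfl
        obtain ⟨q, qs, hL⟩ : ∃ q qs, List.map
            (fun index => PySem.Chars.join []
                ((PySem.List.slice ((b :: bs).drop 4) (some index) (some (index + 4))).map PySem.Int.toChars))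
            (PySem.List.pyRange 0 ((((b :: bs).drop 4).length : Nat) : Int) 4) = q :: qs := by
          rw [pyRange4_cons _ hpos]
          exact ⟨_, _, rfl⟩
        rw [hL]
        rw [hL] at hih
        rw [PySem.Chars.join_cons_cons, hih]
        conv_rhs => rw [fmt]
        rw [if_neg hD, join_empty_sep]
        simp [List.append_assoc]

-- ===== VERDICT (by name: the statement is the Claim_ definition above) =====
theorem format_excess3_py_spec : Claim_equal_format_excess3_py := by
  intro dec_value bits _
  unfold Spec_format_excess3_py format_excess3_py format_excess3_py_alt
  rw [PySem.List.foldl_append_singleton_eq_map]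
  simp only [List.nil_append]
  have hB : (PySem.List.enumerate bits).foldl
      (fun out ib =>
        (out ++ (if 0 < ib.1 ∧ PySem.Int.mod ib.1 4 = 0 then [' '] else [])) ++ PySem.Int.toChars ib.2)
      [] = fmt bits := by
    have := goB_fmt bits.length bits rfl 0
    simpa [goB] using this
  rw [hB, A_core_fmt bits.length bits rfl]
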